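-- pv_equiv track=rewrite | github.com/DnyaneshwarBajad/Python | calender/calender3.py | cal_printer
-- ===== SOURCE A (Python) =====
-- months_to_days = {'Jan': 31, 'Feb': 28, 'Mar': 31, 'Apr': 30, 'May': 31, 'Jun': 30,
--                   'Jul': 31, 'Aug': 31, 'Sep': 30, 'Oct': 31, 'Nov': 30, 'Dec': 31}
--
-- day_names = ['Sun', 'Mon', 'Tue', 'Wed', 'Thu', 'Fri', 'Sat']
--
-- def is_leap_year(year):
--     """Check if a year is a leap year."""
--     return year % 4 == 0 and (year % 100 != 0 or year % 400 == 0)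
--
-- def get_start_day_of_year(year):
--     """Calculate the start day of the year using Zeller's Congruence."""
--     day = (year - 1) % 400
--     day = (day // 100) * 5 + ((day % 100) - (day % 100) // 4) + ((day % 100) // 4) * 2
--     return day % 7
--
-- def generate_month_grid(start_day, days_in_month):
--     """Generate a 2D grid for the given month."""
--     grid = [['' for _ in range(7)] for _ in range(6)]
--     current_day = 1
--
--     for i in range(6):
--         for j in range(7):
--             if i == 0 and j < start_day:
--                 continue
--             if current_day > days_in_month:
--                 break
--             grid[i][j] = f"{current_day:2}"
--             current_day += 1
--
--     return grid
--
-- def display_month_grid(month_name, year, grid):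
--     """Display the month grid with headers."""
--     output = f"{month_name} {year}".center(20, '-') + '\n'
--     output += ' '.join(day_names) + '\n'
--     for week in grid:
--         output += ' '.join(day if day else '  ' for day in week) + '\n'
--     return output
--
-- def cal_printer(month, year):
--     """Generate a formatted string for a specific month's calendar."""
--     days_in_month = months_to_days[list(months_to_days.keys())[month - 1]]
--     if month == 2 and is_leap_year(year):
--         days_in_month = 29
--
--     start_day = (get_start_day_of_year(year) + sum(
--         [months_to_days[list(months_to_days.keys())[i]] for i in range(month - 1)]
--     )) % 7
--
--     grid = generate_month_grid(start_day, days_in_month)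
--     month_name = list(months_to_days.keys())[month - 1]
--     return display_month_grid(month_name, year, grid)
-- ===== SOURCE B (Python) =====
-- # B: closed-form weekday + precomputed mod-7 month-offset table, and each calendar
-- # cell is rendered directly from its (row, col) position; no Zeller division chain,
-- # no runtime summation of month lengths, no grid filled by a running day cursor.
--
-- _MONTHS = [('Jan', 31), ('Feb', 28), ('Mar', 31), ('Apr', 30), ('May', 31), ('Jun', 30),
--            ('Jul', 31), ('Aug', 31), ('Sep', 30), ('Oct', 31), ('Nov', 30), ('Dec', 31)]
-- # cumulative (Feb=28) month-length offsets mod 7, matching A's runtime sum mod 7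
-- _OFFSETS = [0, 3, 3, 6, 1, 4, 6, 2, 5, 0, 3, 5]
-- _HEADER = 'Sun Mon Tue Wed Thu Fri Sat'
--
--
-- def cal_printer(month, year):
--     name, ndays = _MONTHS[month - 1]
--     if month == 2 and year % 4 == 0 and (year % 100 != 0 or year % 400 == 0):
--         ndays = 29
--     # closed congruence for the year's start day (equivalent mod 7 to A's Zeller chain)
--     jan1 = (5 * ((year - 1) % 4) + 4 * ((year - 1) % 100) + 6 * ((year - 1) % 400)) % 7
--     start = (jan1 + _OFFSETS[month - 1]) % 7
--
--     def cell(slot):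
--         day = slot - start + 1
--         return f'{day:2}' if 1 <= day <= ndays else '  '
--
--     body = '\n'.join(' '.join(cell(7 * r + c) for c in range(7)) for r in range(6))
--     return f'{name} {year}'.center(20, '-') + '\n' + _HEADER + '\n' + body + '\n'
-- ===== Notes on version B (the rewrite author's own statement) =====
-- stated objective: alternative
-- what changed: B computes the weekday by a closed congruence on (year-1) mod 4/100/400 instead of A's Zeller division chain, looks the month offset up in a precomputed mod-7 table instead of summing month lengths at runtime, and renders each calendar cell directly from its (row, col) position instead of filling a 6x7 grid with a running day cursor.
import Mathlib
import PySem

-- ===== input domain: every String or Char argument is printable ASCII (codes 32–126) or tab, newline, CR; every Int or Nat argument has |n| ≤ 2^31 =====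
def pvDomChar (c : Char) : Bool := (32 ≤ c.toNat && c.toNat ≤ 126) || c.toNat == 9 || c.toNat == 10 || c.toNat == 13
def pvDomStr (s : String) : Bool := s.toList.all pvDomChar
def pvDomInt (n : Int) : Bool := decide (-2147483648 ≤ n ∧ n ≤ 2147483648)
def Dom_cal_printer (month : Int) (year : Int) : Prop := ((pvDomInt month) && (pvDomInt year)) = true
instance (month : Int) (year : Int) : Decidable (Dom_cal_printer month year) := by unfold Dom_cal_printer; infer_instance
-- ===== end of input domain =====

-- B replaces A's Zeller division chain by a closed weekday congruence, A's runtime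
-- month-length summation by a precomputed mod-7 offset table, and A's cursor-filled
-- grid by rendering each cell directly from its (row, col) position (objective: alternative).

-- shared helpers: both Pythons call str.center(20,'-') and format f"{n:2}" the same way
-- hand port of s.center(w, f): exact CPython rule (left = marg//2 + (marg & w & 1))
def pyCenter (s : String) (w : Nat) (f : Char) : String :=
  let cs := s.toList
  if w ≤ cs.length then s
  else
    let marg := w - cs.length
    let left := marg / 2 + (marg &&& w &&& 1)
    String.ofList (List.replicate left f ++ cs ++ List.replicate (marg - left) f)

-- hand port of f"{n:2}": right-justify str(n) to width 2 with spaces (exact for every int)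
def fmt2 (n : Int) : String :=
  let cs := PySem.Int.toChars n
  if cs.length < 2 then String.ofList (' ' :: cs) else String.ofList cs

-- ===== PORT A =====
def monthsToDays : PySem.Dict String Int :=
  PySem.Dict.ofList [("Jan", 31), ("Feb", 28), ("Mar", 31), ("Apr", 30), ("May", 31), ("Jun", 30),
                     ("Jul", 31), ("Aug", 31), ("Sep", 30), ("Oct", 31), ("Nov", 30), ("Dec", 31)]

def dayNames : List String := ["Sun", "Mon", "Tue", "Wed", "Thu", "Fri", "Sat"]

def isLeapYear (year : Int) : Bool :=
  PySem.Int.mod year 4 == 0 && (!(PySem.Int.mod year 100 == 0) || PySem.Int.mod year 400 == 0)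

def getStartDayOfYear (year : Int) : Int :=
  let day := PySem.Int.mod (year - 1) 400
  let day2 := (PySem.Int.floordiv day 100) * 5 + ((PySem.Int.mod day 100) - PySem.Int.floordiv (PySem.Int.mod day 100) 4) + (PySem.Int.floordiv (PySem.Int.mod day 100) 4) * 2
  PySem.Int.mod day2 7

-- inner j-loop of generate_month_grid: 'continue' skips a cell, 'break' leaves the rest of the row ''
def rowGo (i startDay days : Int) : Int → List Int → List String × Int
  | cur, [] => ([], cur)
  | cur, j :: js =>
    if i == 0 && decide (j < startDay) then
      let r := rowGo i startDay days cur js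
      ("" :: r.1, r.2)
    else if decide (days < cur) then
      ("" :: js.map (fun _ => ""), cur)
    else
      let r := rowGo i startDay days (cur + 1) js
      (fmt2 cur :: r.1, r.2)

def generateMonthGrid (startDay daysInMonth : Int) : List (List String) :=
  ((PySem.List.pyRange 0 6 1).foldl
    (fun st i =>
      let r := rowGo i startDay daysInMonth st.2 (PySem.List.pyRange 0 7 1)
      (st.1 ++ [r.1], r.2))
    (([] : List (List String)), 1)).1

def displayMonthGrid (monthName : String) (year : Int) (grid : List (List String)) : String :=
  let output := pyCenter (monthName ++ " " ++ PySem.Int.toStr year) 20 '-' ++ "\n"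
  let output := output ++ (PySem.Str.join " " dayNames ++ "\n")
  grid.foldl
    (fun out week => out ++ (PySem.Str.join " " (week.map (fun d => if d == "" then "  " else d)) ++ "\n"))
    output

def cal_printer (month : Int) (year : Int) : String :=
  -- .getD defaults are unreachable inside Pre_ (Python raises IndexError there instead)
  let keys := PySem.Dict.keys monthsToDays
  let daysInMonth0 := (PySem.Dict.get? monthsToDays ((PySem.List.pyGet? keys (month - 1)).getD "")).getD 0
  let daysInMonth := if month == 2 && isLeapYear year then 29 else daysInMonth0
  let startDay := PySem.Int.mod (getStartDayOfYear year +
    ((PySem.List.pyRange 0 (month - 1) 1).map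
      (fun i => (PySem.Dict.get? monthsToDays ((PySem.List.pyGet? keys i).getD "")).getD 0)).sum) 7
  let grid := generateMonthGrid startDay daysInMonth
  let monthName := (PySem.List.pyGet? keys (month - 1)).getD ""
  displayMonthGrid monthName year grid

-- ===== PORT B =====
def bMonths : List (String × Int) :=
  [("Jan", 31), ("Feb", 28), ("Mar", 31), ("Apr", 30), ("May", 31), ("Jun", 30),
   ("Jul", 31), ("Aug", 31), ("Sep", 30), ("Oct", 31), ("Nov", 30), ("Dec", 31)]

-- Source B's precomputed cumulative (Feb=28) month-length offsets mod 7
def bOffsets : List Int := [0, 3, 3, 6, 1, 4, 6, 2, 5, 0, 3, 5]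

def bHeader : String := "Sun Mon Tue Wed Thu Fri Sat"

def bCell (start ndays slot : Int) : String :=
  let day := slot - start + 1
  if decide (1 ≤ day) && decide (day ≤ ndays) then fmt2 day else "  "

def cal_printer_alt (month : Int) (year : Int) : String :=
  -- .getD defaults unreachable inside Pre_ (Python raises IndexError there instead)
  let p := (PySem.List.pyGet? bMonths (month - 1)).getD ("", 0)
  let name := p.1
  let ndays := if month == 2 && (PySem.Int.mod year 4 == 0 && (!(PySem.Int.mod year 100 == 0) || PySem.Int.mod year 400 == 0)) then 29 else p.2
  let jan1 := PySem.Int.mod (5 * PySem.Int.mod (year - 1) 4 + 4 * PySem.Int.mod (year - 1) 100 + 6 * PySem.Int.mod (year - 1) 400) 7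
  let start := PySem.Int.mod (jan1 + (PySem.List.pyGet? bOffsets (month - 1)).getD 0) 7
  let body := PySem.Str.join "\n" ((PySem.List.pyRange 0 6 1).map (fun r =>
    PySem.Str.join " " ((PySem.List.pyRange 0 7 1).map (fun c => bCell start ndays (7 * r + c)))))
  pyCenter (name ++ " " ++ PySem.Int.toStr year) 20 '-' ++ "\n" ++ bHeader ++ "\n" ++ body ++ "\n"

-- ===== PRECONDITION & SPEC =====
-- Pre_ restricts to the natural month numbers 1..12: outside them A raises IndexError
-- (month ≤ -12 or month ≥ 13) or, via Python's negative-index wraparound for -11 ≤ month ≤ 0,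
-- returns a calendar for a wrapped month whose start day mixes that month's name with an
-- empty prior-month sum — a corner no caller would specify, where B's table lookup is as defensible.
def Pre_cal_printer (month : Int) (year : Int) : Prop := 1 ≤ month ∧ month ≤ 12
instance (month : Int) (year : Int) : Decidable (Pre_cal_printer month year) := by unfold Pre_cal_printer; infer_instance

def pvWitness_cal_printer : Int × Int := (3, 2024)

def Spec_cal_printer (month : Int) (year : Int) (out : String) : Prop := out = cal_printer_alt month year
instance (month : Int) (year : Int) (out : String) : Decidable (Spec_cal_printer month year out) := by unfold Spec_cal_printer; infer_instance

-- ===== CLAIM (what is proved, stated in full; the proofs are below) =====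
def Claim_equal_cal_printer : Prop := ∀ (month : Int) (year : Int), Dom_cal_printer month year → Pre_cal_printer month year → Spec_cal_printer month year (cal_printer month year)

-- ===== LEMMAS AND PROOFS =====

-- A's start-day value (Zeller chain + runtime sum S) equals B's (closed congruence + offset),
-- whenever off ≡ S (mod 7): everything is linear arithmetic over emod/ediv, so omega closes it.
theorem start_eq (y S off : Int) (hoff : S % 7 = off % 7) :
    PySem.Int.mod (getStartDayOfYear y + S) 7 =
      PySem.Int.mod (PySem.Int.mod (5 * PySem.Int.mod (y - 1) 4 + 4 * PySem.Int.mod (y - 1) 100 + 6 * PySem.Int.mod (y - 1) 400) 7 + off) 7 := by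
  have h4 : (0:Int) < 4 := by norm_num
  have h7 : (0:Int) < 7 := by norm_num
  have h100 : (0:Int) < 100 := by norm_num
  have h400 : (0:Int) < 400 := by norm_num
  simp only [getStartDayOfYear,
    PySem.Int.mod_eq_emod_of_pos h4, PySem.Int.mod_eq_emod_of_pos h7,
    PySem.Int.mod_eq_emod_of_pos h100, PySem.Int.mod_eq_emod_of_pos h400,
    PySem.Int.floordiv_eq_ediv_of_pos h4, PySem.Int.floordiv_eq_ediv_of_pos h100]
  have e2 : (y-1) % 4 = (y-1) % 400 % 4 := by omega
  have e3 : (y-1) % 100 = (y-1) % 400 % 100 := by omega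
  have e1 : (y-1) % 400 % 100 % 4 = (y-1) % 400 % 4 := by omega
  -- the two weekday expressions differ by an explicit multiple of 7
  have hb : 5*((y-1)%4) + 4*((y-1)%100) + 6*((y-1)%400) =
      ((y-1)%400/100*5 + ((y-1)%400%100 - (y-1)%400%100/4) + (y-1)%400%100/4*2) +
        7*(85*((y-1)%400/100) + 5*((y-1)%400%100/4) + 2*((y-1)%400%4)) := by omega
  omega

-- B's six row strings joined (the tail of cal_printer_alt after the two header lines)
def bodyB (s d : Int) : String :=
  PySem.Str.join "\n" ((PySem.List.pyRange 0 6 1).map (fun r =>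
    PySem.Str.join " " ((PySem.List.pyRange 0 7 1).map (fun c => bCell s d (7 * r + c)))))

theorem foldl_str_shift {α : Type} (g : α → String) (l : List α) (init : String) :
    l.foldl (fun out x => out ++ g x) init = init ++ l.foldl (fun out x => out ++ g x) "" := by
  induction l generalizing init with
  | nil => simp [List.foldl, String.append_empty]
  | cons a l ih =>
    rw [List.foldl_cons, List.foldl_cons, ih, ih ("" ++ g a)]
    simp [String.empty_append, String.append_assoc]

theorem display_eq (name : String) (y : Int) (g : List (List String)) :
    displayMonthGrid name y g =
      (pyCenter (name ++ " " ++ PySem.Int.toStr y) 20 '-' ++ "\n" ++ (PySem.Str.join " " dayNames ++ "\n")) ++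
      g.foldl (fun out week => out ++ (PySem.Str.join " " (week.map (fun x => if x == "" then "  " else x)) ++ "\n")) "" := by
  unfold displayMonthGrid
  rw [foldl_str_shift]

set_option maxRecDepth 40000 in
set_option maxHeartbeats 2000000 in
theorem master (name : String) (y : Int) (S off d : Int)
    (hoff : S % 7 = off % 7)
    (hd : d = 28 ∨ d = 29 ∨ d = 30 ∨ d = 31) :
    displayMonthGrid name y (generateMonthGrid (PySem.Int.mod (getStartDayOfYear y + S) 7) d) =
      pyCenter (name ++ " " ++ PySem.Int.toStr y) 20 '-' ++ "\n" ++ bHeader ++ "\n" ++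
        bodyB (PySem.Int.mod (PySem.Int.mod (5 * PySem.Int.mod (y - 1) 4 + 4 * PySem.Int.mod (y - 1) 100 + 6 * PySem.Int.mod (y - 1) 400) 7 + off) 7) d ++ "\n" := by
  rw [start_eq y S off hoff]
  have hs0 : 0 ≤ PySem.Int.mod (PySem.Int.mod (5 * PySem.Int.mod (y - 1) 4 + 4 * PySem.Int.mod (y - 1) 100 + 6 * PySem.Int.mod (y - 1) 400) 7 + off) 7 :=
    PySem.Int.mod_nonneg _ (by norm_num)
  have hs7 : PySem.Int.mod (PySem.Int.mod (5 * PySem.Int.mod (y - 1) 4 + 4 * PySem.Int.mod (y - 1) 100 + 6 * PySem.Int.mod (y - 1) 400) 7 + off) 7 < 7 :=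
    PySem.Int.mod_lt _ (by norm_num)
  set s := PySem.Int.mod (PySem.Int.mod (5 * PySem.Int.mod (y - 1) 4 + 4 * PySem.Int.mod (y - 1) 100 + 6 * PySem.Int.mod (y - 1) 400) 7 + off) 7 with hs
  clear_value s
  rw [display_eq]
  have hweeks : (generateMonthGrid s d).foldl
      (fun out week => out ++ (PySem.Str.join " " (week.map (fun x => if x == "" then "  " else x)) ++ "\n")) "" =
      bodyB s d ++ "\n" := by
    have hsv : s = 0 ∨ s = 1 ∨ s = 2 ∨ s = 3 ∨ s = 4 ∨ s = 5 ∨ s = 6 := by omega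
    rcases hd with h | h | h | h <;> rcases hsv with h' | h' | h' | h' | h' | h' | h' <;>
      subst h <;> subst h' <;> decide
  rw [hweeks]
  have hhdr : PySem.Str.join " " dayNames = bHeader := by decide
  rw [hhdr]
  simp [String.append_assoc]

-- ===== VERDICT (by name: the statement is the Claim_ definition above) =====
theorem cal_printer_spec : Claim_equal_cal_printer := by
  intro m y _ hpre
  unfold Pre_cal_printer at hpre
  unfold Spec_cal_printer
  obtain ⟨h1, h2⟩ := hpre
  interval_cases m
  · exact master "Jan" y 0 0 31 (by norm_num) (by norm_num)
  · by_cases hL : isLeapYear y = true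
    · have hL2 : (PySem.Int.mod y 4 == 0 && (!(PySem.Int.mod y 100 == 0) || PySem.Int.mod y 400 == 0)) = true := hL
      simp only [cal_printer, cal_printer_alt, hL, hL2]
      exact master "Feb" y 31 3 29 (by norm_num) (by norm_num)
    · have hLf : isLeapYear y = false := by simpa using hL
      have hL2 : (PySem.Int.mod y 4 == 0 && (!(PySem.Int.mod y 100 == 0) || PySem.Int.mod y 400 == 0)) = false := hLf
      simp only [cal_printer, cal_printer_alt, hLf, hL2]
      exact master "Feb" y 31 3 28 (by norm_num) (by norm_num)
  · exact master "Mar" y 59 3 31 (by norm_num) (by norm_num)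
  · exact master "Apr" y 90 6 30 (by norm_num) (by norm_num)
  · exact master "May" y 120 1 31 (by norm_num) (by norm_num)
  · exact master "Jun" y 151 4 30 (by norm_num) (by norm_num)
  · exact master "Jul" y 181 6 31 (by norm_num) (by norm_num)
  · exact master "Aug" y 212 2 31 (by norm_num) (by norm_num)
  · exact master "Sep" y 243 5 30 (by norm_num) (by norm_num)
  · exact master "Oct" y 273 0 31 (by norm_num) (by norm_num)
  · exact master "Nov" y 304 3 30 (by norm_num) (by norm_num)
  · exact master "Dec" y 334 5 31 (by norm_num) (by norm_num)
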